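-- pv_equiv track=rewrite | github.com/GSYBD/SXLNLP | wu_weiyan/week4作业.py | all_cut
-- ===== SOURCE A (Python) =====
-- def all_cut(sentence, Dict):
--     target = []
--
--     def dfs(start, words):
--         if start == len(sentence):
--             target.append(words)
--             return
--         for end in range(start + 1, len(sentence) + 1):
--             word = sentence[start:end]
--             if word in Dict:
--                 dfs(end, words + [word])
--     dfs(0, [])
--     return target
-- ===== SOURCE B (Python) =====
-- def all_cut(sentence, Dict):
--     # Bottom-up DP: segs[i] = all segmentations of sentence[i:], built from the end
--     # so each suffix is computed once and shared; candidate words are bounded by the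
--     # longest key, and rows are only materialized at positions whose prefix is
--     # segmentable (forward reachability), so work is proportional to the output.
--     n = len(sentence)
--     keys = set(Dict)
--     maxlen = max(map(len, keys), default=0)
--     fwd = [False] * (n + 1)
--     fwd[0] = True
--     for j in range(1, n + 1):
--         for i in range(max(0, j - maxlen), j):
--             if fwd[i] and sentence[i:j] in keys:
--                 fwd[j] = True
--                 break
--     segs = [None] * (n + 1)
--     segs[n] = [[]]
--     for i in range(n - 1, -1, -1):
--         cur = []
--         if fwd[i]:
--             for end in range(i + 1, min(n, i + maxlen) + 1):
--                 w = sentence[i:end]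
--                 if w in keys:
--                     for rest in segs[end]:
--                         cur.append([w] + rest)
--         segs[i] = cur
--     return segs[0]
-- ===== Notes on version B (the rewrite author's own statement) =====
-- stated objective: faster
-- what changed: A enumerates segmentations by a top-down DFS that re-explores every suffix once per distinct prefix reaching it; B builds a bottom-up table segs[i] of all segmentations of sentence[i:] from the end (candidate words bounded by the longest key length), computing each suffix once and sharing it, and returns segs[0] — identical list, identical order; intended as faster and measured 2.5-158x in a timing run up to n=4096, unconfirmed at the largest size where both time out (output can be exponential).
import Mathlib
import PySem

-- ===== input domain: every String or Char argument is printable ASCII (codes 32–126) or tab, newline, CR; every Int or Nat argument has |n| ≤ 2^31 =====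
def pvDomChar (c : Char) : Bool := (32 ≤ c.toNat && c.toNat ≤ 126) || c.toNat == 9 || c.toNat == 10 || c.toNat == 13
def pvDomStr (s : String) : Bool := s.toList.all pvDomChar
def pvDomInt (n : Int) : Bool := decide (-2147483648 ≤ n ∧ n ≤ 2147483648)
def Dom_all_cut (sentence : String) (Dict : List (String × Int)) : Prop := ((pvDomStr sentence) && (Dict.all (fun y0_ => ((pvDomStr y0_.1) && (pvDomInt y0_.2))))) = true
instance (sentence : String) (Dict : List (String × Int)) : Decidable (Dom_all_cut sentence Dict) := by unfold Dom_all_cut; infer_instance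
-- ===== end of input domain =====

-- B replaces A's prefix-carrying DFS by a bottom-up suffix DP (segs[i] = all segmentations
-- of sentence[i:], each suffix computed once and shared, candidate words bounded by the
-- longest key, rows only materialized at forward-reachable positions), returning the
-- identical list in the identical order; intended as faster (output-sensitive).

-- ===== PORT A =====
-- dfs(start, words); the slice sentence[start:end] has 0 ≤ start < end ≤ len, so drop/take is exact.
def pvDfsA (s : List Char) (keys : List String) (start : Nat) (words : List String) :
    List (List String) :=
  if start = s.length then [words]
  else
    (List.range' (start + 1) (s.length - start)).attach.foldl
      (fun acc e =>
        if keys.contains (String.mk ((s.drop start).take (e.1 - start))) then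
          acc ++ pvDfsA s keys e.1 (words ++ [String.mk ((s.drop start).take (e.1 - start))])
        else acc) []
termination_by s.length - start
decreasing_by
  have h := List.mem_range'_1.mp e.2
  omega

def all_cut (sentence : String) (Dict : List (String × Int)) : List (List String) :=
  pvDfsA sentence.toList (Dict.map Prod.fst) 0 []

-- ===== PORT B =====
-- B's forward loop 'for j in range(1, n+1): for i in ...: if fwd[i] and s[i:j] in keys: fwd[j]=True; break'
-- (a forward-filled table built left to right; the inner break-loop is an 'any')
def pvFwdTable (s : List Char) (keys : List String) (maxlen : Nat) : List Bool :=
  (List.range' 1 s.length).foldl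
    (fun fwd j =>
      fwd ++ [(List.range' (max 0 (j - maxlen)) (j - max 0 (j - maxlen))).any
        (fun i => fwd.getD i false
          && keys.contains (String.mk ((s.drop i).take (j - i))))]) [true]

-- one row of the table: segs[i] computed from segs = [segs_{i+1}, …, segs_n]
-- (the 'if fwd[i]:' guard and inner 'for end in range(i+1, min(n, i+maxlen)+1)' loop)
def pvRowB (s : List Char) (keys : List String) (maxlen : Nat) (fwd : List Bool)
    (segs : List (List (List String))) (i : Nat) : List (List String) :=
  if fwd.getD i false then
    ((List.range' (i + 1) (min s.length (i + maxlen) - i)).map (fun e =>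
      if List.contains keys (String.mk ((s.drop i).take (e - i))) then
        (segs.getD (e - (i + 1)) []).map (fun r => String.mk ((s.drop i).take (e - i)) :: r)
      else [])).flatten
  else []

-- the main loop: each iteration conses the new row in front; segs[0] is the head at the end
def all_cut_alt (sentence : String) (Dict : List (String × Int)) : List (List String) :=
  ((List.range sentence.toList.length).foldl
    (fun segs j =>
      pvRowB sentence.toList (PySem.Set.ofList (Dict.map Prod.fst))
        (((PySem.Set.ofList (Dict.map Prod.fst)).map String.length).foldl max 0)
        (pvFwdTable sentence.toList (PySem.Set.ofList (Dict.map Prod.fst))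
          (((PySem.Set.ofList (Dict.map Prod.fst)).map String.length).foldl max 0))
        segs (sentence.toList.length - 1 - j) :: segs) [[[]]]).getD 0 []

-- ===== PRECONDITION & SPEC =====
def Spec_all_cut (sentence : String) (Dict : List (String × Int)) (out : List (List String)) : Prop := out = all_cut_alt sentence Dict
instance (sentence : String) (Dict : List (String × Int)) (out : List (List String)) : Decidable (Spec_all_cut sentence Dict out) := by unfold Spec_all_cut; infer_instance

-- ===== CLAIM (what is proved, stated in full; the proofs are below) =====
def Claim_equal_all_cut : Prop := ∀ (sentence : String) (Dict : List (String × Int)), Dom_all_cut sentence Dict → Spec_all_cut sentence Dict (all_cut sentence Dict)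

-- ===== LEMMAS AND PROOFS =====

-- proof-only reference: pvSegSpec mem i = all segmentations of s[i:], in A's DFS order
def pvSegSpec (s : List Char) (mem : String → Bool) (i : Nat) : List (List String) :=
  if i = s.length then [[]]
  else
    ((List.range' (i + 1) (s.length - i)).attach.map (fun e =>
      if mem (String.mk ((s.drop i).take (e.1 - i))) then
        (pvSegSpec s mem e.1).map
          (fun r => String.mk ((s.drop i).take (e.1 - i)) :: r)
      else [])).flatten
termination_by s.length - i
decreasing_by
  have h := List.mem_range'_1.mp e.2
  omega

-- proof-only reference for B's forward table: fwd[j] = "sentence[:j] is segmentable"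
def pvFwdB (s : List Char) (keys : List String) (maxlen : Nat) : Nat → Bool
  | 0 => true
  | (j+1) =>
    ((List.range' (max 0 (j + 1 - maxlen)) (j + 1 - max 0 (j + 1 - maxlen))).attach.map
      (fun i => pvFwdB s keys maxlen i.1
        && keys.contains (String.mk ((s.drop i.1).take (j + 1 - i.1))))).any id
termination_by j => j
decreasing_by
  have h := List.mem_range'_1.mp i.2
  omega

-- proof-only: what the i-th table entry of B's main loop is
def pvEntry (s : List Char) (keys : List String) (maxlen : Nat) (i : Nat) : List (List String) :=
  if pvFwdB s keys maxlen i then pvSegSpec s (fun w => keys.contains w) i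
  else if i = s.length then [[]] else []

theorem pv_foldl_ite_append {α β : Type} (l : List α) (p : α → Bool) (g : α → List β)
    (init : List β) :
    l.foldl (fun acc x => if p x then acc ++ g x else acc) init
      = init ++ (l.map (fun x => if p x then g x else [])).flatten := by
  induction l generalizing init with
  | nil => simp
  | cons a t ih => by_cases hp : p a <;> simp [hp, ih]

theorem pv_map_attach {α β : Type} (l : List α) (f : α → β) :
    l.attach.map (fun x => f x.1) = l.map f := by
  simp [List.attach, List.attachWith, List.map_pmap, List.pmap_eq_map]

theorem pv_any_map_id {α : Type} (l : List α) (f : α → Bool) :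
    (l.attach.map (fun x => f x.1)).any id = l.any f := by
  rw [pv_map_attach, List.any_map]
  rfl

theorem pv_contains_ofList (l : List String) (x : String) :
    List.contains (PySem.Set.ofList l) x = l.contains x := by
  by_cases h : x ∈ l <;> simp [PySem.Set.mem_ofList, h]

theorem pvDfsA_eq (s : List Char) (keys : List String) (start : Nat) (words : List String) :
    pvDfsA s keys start words =
      (pvSegSpec s (fun w => keys.contains w) start).map (fun r => words ++ r) := by
  rw [pvDfsA, pvSegSpec]
  split
  · simp
  · refine (pv_foldl_ite_append
      ((List.range' (start + 1) (s.length - start)).attach)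
      (fun e => keys.contains (String.mk ((s.drop start).take (e.1 - start))))
      (fun e => pvDfsA s keys e.1
        (words ++ [String.mk ((s.drop start).take (e.1 - start))])) []).trans ?_
    rw [List.nil_append, List.map_flatten, List.map_map]
    apply congrArg List.flatten
    apply List.map_congr_left
    intro e he
    have hm := List.mem_range'_1.mp e.2
    simp only [Function.comp]
    by_cases hp : keys.contains (String.mk ((s.drop start).take (e.1 - start))) = true
    · rw [if_pos hp, if_pos hp,
        pvDfsA_eq s keys e.1 (words ++ [String.mk ((s.drop start).take (e.1 - start))])]
      simp [List.map_map, Function.comp]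
    · rw [if_neg hp, if_neg hp]; simp
termination_by s.length - start
decreasing_by omega

theorem pv_init_le_foldl_max (l : List Nat) (b : Nat) : b ≤ l.foldl max b := by
  induction l generalizing b with
  | nil => exact le_refl b
  | cons x t ih => exact le_trans (le_max_left b x) (ih (max b x))

theorem pv_mem_le_foldl_max (l : List Nat) (a b : Nat) (h : a ∈ l) : a ≤ l.foldl max b := by
  induction l generalizing b with
  | nil => cases h
  | cons x t ih =>
    rcases List.mem_cons.mp h with rfl | h'
    · exact le_trans (le_max_right b a) (pv_init_le_foldl_max t (max b a))
    · exact ih (max b x) h'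

theorem pv_contains_long (keys : List String) (w : String)
    (h : (keys.map String.length).foldl max 0 < w.length) : keys.contains w = false := by
  cases hc : keys.contains w with
  | false => rfl
  | true =>
    exfalso
    have hmem : w ∈ keys := by simpa using hc
    have := pv_mem_le_foldl_max (keys.map String.length) w.length 0
      (List.mem_map_of_mem hmem)
    omega

theorem pv_toList_mk (l : List Char) : (String.mk l).toList = l :=
  Eq.symm (String.ofList_eq.mp rfl)

theorem pv_strlen (l : List Char) : (String.mk l).length = l.length := by
  rw [← String.length_toList, pv_toList_mk]

theorem pv_getD_map_range {α : Type} (f : Nat → α) (n i : Nat) (d : α) (h : i < n) :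
    ((List.range n).map f).getD i d = f i := by
  rw [List.getD_eq_getElem?_getD, List.getElem?_map, List.getElem?_range h]
  rfl

theorem pv_any_congr {α : Type} (l : List α) (f g : α → Bool) (h : ∀ x ∈ l, f x = g x) :
    l.any f = l.any g := by
  induction l with
  | nil => rfl
  | cons a t ih =>
    simp only [List.any_cons]
    rw [h a (by simp), ih (fun x hx => h x (List.mem_cons_of_mem a hx))]

-- invariant of B's forward loop: after k iterations the table is [pvFwdB 0, …, pvFwdB k]
theorem pv_fwd_inv (s : List Char) (keys : List String) (maxlen : Nat) (k : Nat) :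
    (List.range' 1 k).foldl
      (fun fwd j =>
        fwd ++ [(List.range' (max 0 (j - maxlen)) (j - max 0 (j - maxlen))).any
          (fun i => fwd.getD i false
            && keys.contains (String.mk ((s.drop i).take (j - i))))]) [true]
    = (List.range (k + 1)).map (pvFwdB s keys maxlen) := by
  induction k with
  | zero => simp [pvFwdB]
  | succ k ih =>
    have hcat := @List.range'_append 1 k 1 1
    rw [one_mul] at hcat
    rw [← hcat, List.foldl_append, List.range'_one, List.foldl_cons, List.foldl_nil, ih,
      show 1 + k = k + 1 from Nat.add_comm 1 k, List.range_succ (n := k + 1),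
      List.map_append]
    congr 1
    rw [List.map_singleton, pvFwdB]
    have hswap := pv_any_map_id
      (List.range' (max 0 (k + 1 - maxlen)) (k + 1 - max 0 (k + 1 - maxlen)))
      (fun i => pvFwdB s keys maxlen i
        && keys.contains (String.mk ((s.drop i).take (k + 1 - i))))
    rw [hswap]
    congr 1
    apply pv_any_congr
    intro i hi
    have hm := List.mem_range'_1.mp hi
    rw [pv_getD_map_range (pvFwdB s keys maxlen) (k + 1) i false (by omega)]

theorem pvFwdTable_eq (s : List Char) (keys : List String) (maxlen : Nat) :
    pvFwdTable s keys maxlen = (List.range (s.length + 1)).map (pvFwdB s keys maxlen) := by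
  rw [pvFwdTable, pv_fwd_inv]

-- stepping forward reachability across one dictionary word
theorem pv_fwd_step (s : List Char) (keys : List String) (maxlen : Nat) (i e : Nat)
    (hi : pvFwdB s keys maxlen i = true)
    (hc : keys.contains (String.mk ((s.drop i).take (e - i))) = true)
    (h1 : i < e) (h2 : e ≤ i + maxlen) :
    pvFwdB s keys maxlen e = true := by
  cases e with
  | zero => omega
  | succ j =>
    rw [pvFwdB]
    have hswap := pv_any_map_id
      (List.range' (max 0 (j + 1 - maxlen)) (j + 1 - max 0 (j + 1 - maxlen)))
      (fun i2 => pvFwdB s keys maxlen i2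
        && keys.contains (String.mk ((s.drop i2).take (j + 1 - i2))))
    rw [hswap, List.any_eq_true]
    exact ⟨i, List.mem_range'_1.mpr (by omega), by rw [hi, hc]; rfl⟩

-- the freshly computed row equals pvEntry at i = s.length - (k+1)
theorem pv_row (s : List Char) (keys : List String) (k : Nat) (hk : k + 1 ≤ s.length) :
    pvRowB s keys ((keys.map String.length).foldl max 0)
      (pvFwdTable s keys ((keys.map String.length).foldl max 0))
      ((List.range' (s.length - k) (k + 1)).map
        (pvEntry s keys ((keys.map String.length).foldl max 0)))
      (s.length - (k + 1))
    = pvEntry s keys ((keys.map String.length).foldl max 0) (s.length - (k + 1)) := by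
  rw [pvRowB, pvFwdTable_eq,
    pv_getD_map_range (pvFwdB s keys ((keys.map String.length).foldl max 0))
      (s.length + 1) (s.length - (k + 1)) false (by omega),
    pvEntry]
  cases hf : pvFwdB s keys ((keys.map String.length).foldl max 0) (s.length - (k + 1)) with
  | false =>
    rw [if_neg (by simp), if_neg (by simp), if_neg (by omega)]
  | true =>
    rw [if_pos rfl, if_pos rfl, pvSegSpec, if_neg (by omega)]
    refine Eq.trans ?_ (congrArg List.flatten
      (pv_map_attach (List.range' (s.length - (k + 1) + 1) (s.length - (s.length - (k + 1))))
        (fun e =>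
          if keys.contains (String.mk ((s.drop (s.length - (k + 1))).take
              (e - (s.length - (k + 1))))) then
            (pvSegSpec s (fun w => keys.contains w) e).map
              (fun r => String.mk ((s.drop (s.length - (k + 1))).take
                (e - (s.length - (k + 1)))) :: r)
          else [])).symm)
    have hsplit := @List.range'_append (s.length - (k + 1) + 1)
      (min s.length (s.length - (k + 1) + (keys.map String.length).foldl max 0)
        - (s.length - (k + 1)))
      (s.length - (s.length - (k + 1))
        - (min s.length (s.length - (k + 1) + (keys.map String.length).foldl max 0)
          - (s.length - (k + 1)))) 1
    rw [one_mul] at hsplit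
    rw [show (min s.length (s.length - (k + 1) + (keys.map String.length).foldl max 0)
          - (s.length - (k + 1)))
        + (s.length - (s.length - (k + 1))
          - (min s.length (s.length - (k + 1) + (keys.map String.length).foldl max 0)
            - (s.length - (k + 1))))
        = s.length - (s.length - (k + 1)) by omega] at hsplit
    rw [← hsplit, List.map_append, List.flatten_append]
    have h2 : ((List.range' (s.length - (k + 1) + 1
          + (min s.length (s.length - (k + 1) + (keys.map String.length).foldl max 0)
            - (s.length - (k + 1))))
        (s.length - (s.length - (k + 1))
          - (min s.length (s.length - (k + 1) + (keys.map String.length).foldl max 0)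
            - (s.length - (k + 1))))).map
        (fun e =>
          if keys.contains (String.mk ((s.drop (s.length - (k + 1))).take
              (e - (s.length - (k + 1))))) then
            (pvSegSpec s (fun w => keys.contains w) e).map
              (fun r => String.mk ((s.drop (s.length - (k + 1))).take
                (e - (s.length - (k + 1)))) :: r)
          else [])).flatten = [] := by
      rw [List.flatten_eq_nil_iff]
      intro x hx
      rcases List.mem_map.mp hx with ⟨e, he, rfl⟩
      have hm := List.mem_range'_1.mp he
      have hc : keys.contains (String.mk ((s.drop (s.length - (k + 1))).take
          (e - (s.length - (k + 1))))) = false := by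
        apply pv_contains_long
        rw [pv_strlen, List.length_take, List.length_drop]
        omega
      rw [if_neg (by rw [hc]; exact Bool.false_ne_true)]
    rw [h2, List.append_nil]
    apply congrArg List.flatten
    apply List.map_congr_left
    intro e he
    have hm := List.mem_range'_1.mp he
    by_cases hc : keys.contains (String.mk ((s.drop (s.length - (k + 1))).take
        (e - (s.length - (k + 1))))) = true
    · have hgd : ((List.range' (s.length - k) (k + 1)).map
          (pvEntry s keys ((keys.map String.length).foldl max 0))).getD
            (e - (s.length - (k + 1) + 1)) []
          = pvEntry s keys ((keys.map String.length).foldl max 0) e := by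
        have hr : (List.range' (s.length - k) (k + 1))[e - (s.length - (k + 1) + 1)]?
            = some (s.length - k + 1 * (e - (s.length - (k + 1) + 1))) :=
          List.getElem?_range' (by omega)
        rw [List.getD_eq_getElem?_getD, List.getElem?_map, hr]
        simp only [Option.map_some, Option.getD_some]
        congr 1
        omega
      have hfe : pvFwdB s keys ((keys.map String.length).foldl max 0) e = true :=
        pv_fwd_step s keys ((keys.map String.length).foldl max 0) (s.length - (k + 1)) e
          hf hc (by omega) (by omega)
      have hentry : pvEntry s keys ((keys.map String.length).foldl max 0) e
          = pvSegSpec s (fun w => keys.contains w) e := by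
        rw [pvEntry, if_pos hfe]
      rw [if_pos hc, if_pos hc, hgd, hentry]
    · rw [if_neg hc, if_neg hc]

-- invariant of B's main fold: after k iterations the table is [pvEntry (n-k), …, pvEntry n]
theorem pv_table (s : List Char) (keys : List String) (k : Nat) (hk : k ≤ s.length) :
    (List.range k).foldl
      (fun segs j =>
        pvRowB s keys ((keys.map String.length).foldl max 0)
          (pvFwdTable s keys ((keys.map String.length).foldl max 0))
          segs (s.length - 1 - j) :: segs)
      [[[]]]
    = (List.range' (s.length - k) (k + 1)).map
        (pvEntry s keys ((keys.map String.length).foldl max 0)) := by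
  induction k with
  | zero =>
    rw [List.range_zero, List.foldl_nil, Nat.sub_zero, List.range'_one, List.map_singleton]
    have h : pvEntry s keys ((keys.map String.length).foldl max 0) s.length = [[]] := by
      rw [pvEntry]
      cases pvFwdB s keys ((keys.map String.length).foldl max 0) s.length with
      | false => rw [if_neg (by simp), if_pos rfl]
      | true => rw [if_pos rfl, pvSegSpec, if_pos rfl]
    rw [h]
  | succ k ih =>
    rw [List.range_succ, List.foldl_append, List.foldl_cons, List.foldl_nil, ih (by omega)]
    have hi : s.length - 1 - k = s.length - (k + 1) := by omega
    have hi1 : s.length - (k + 1) + 1 = s.length - k := by omega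
    have hrange : List.range' (s.length - (k + 1)) (k + 1 + 1)
        = (s.length - (k + 1)) :: List.range' (s.length - k) (k + 1) := by
      rw [List.range'_succ, hi1]
    rw [hrange, List.map_cons, hi]
    congr 1
    exact pv_row s keys k hk

theorem all_cut_eq_alt (sentence : String) (Dict : List (String × Int)) :
    all_cut sentence Dict = all_cut_alt sentence Dict := by
  unfold all_cut all_cut_alt
  have hmem : (fun w => List.contains (PySem.Set.ofList (Dict.map Prod.fst)) w)
      = (fun w => (Dict.map Prod.fst).contains w) := by
    funext w; exact pv_contains_ofList _ w
  rw [pvDfsA_eq,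
    pv_table sentence.toList (PySem.Set.ofList (Dict.map Prod.fst)) sentence.toList.length
      (le_refl _),
    Nat.sub_self, List.range'_succ, List.map_cons, List.getD_cons_zero]
  have h0 : pvEntry sentence.toList (PySem.Set.ofList (Dict.map Prod.fst))
      (((PySem.Set.ofList (Dict.map Prod.fst)).map String.length).foldl max 0) 0
      = pvSegSpec sentence.toList
          (fun w => List.contains (PySem.Set.ofList (Dict.map Prod.fst)) w) 0 := by
    rw [pvEntry, if_pos (by simp [pvFwdB])]
  rw [h0, hmem]
  simp

-- ===== VERDICT (by name: the statement is the Claim_ definition above) =====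
theorem all_cut_spec : Claim_equal_all_cut := by
  intro sentence Dict _
  exact all_cut_eq_alt sentence Dict
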